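-- pv_equiv track=rewrite | github.com/michaelzhang917/account_ocr | ai/python/OCRtext.py | findTextLine
-- ===== SOURCE A (Python) =====
-- def findTextLine(hist):
--     listOfLines = list()
--     start = -1
--     for i in range(len(hist) - 1):
--         if hist[i] == 0 and hist[i+1] > 0:
--             start = i
--         if hist[i] > 0 and hist[i+1] == 0 and start != -1:
--             end = i+1
--             listOfLines.append((start, end))
--     return listOfLines
-- ===== SOURCE B (Python) =====
-- def findTextLine(hist):
--     n = len(hist)
--     starts = [i for i in range(n - 1) if hist[i] == 0 and hist[i + 1] > 0]
--     ends = [i + 1 for i in range(n - 1) if hist[i] > 0 and hist[i + 1] == 0]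
--     out = []
--     k = 0
--     last = None
--     for e in ends:
--         while k < len(starts) and starts[k] < e:
--             last = starts[k]
--             k += 1
--         if last is not None:
--             out.append((last, e))
--     return out
-- ===== Notes on version B (the rewrite author's own statement) =====
-- stated objective: alternative
-- what changed: Replaces the single stateful scan carrying a persisting start sentinel by two edge-extraction passes (rising-edge indices and falling-edge indices) followed by a sorted two-pointer merge that pairs each falling edge with the nearest preceding rising edge.
import Mathlib
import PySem

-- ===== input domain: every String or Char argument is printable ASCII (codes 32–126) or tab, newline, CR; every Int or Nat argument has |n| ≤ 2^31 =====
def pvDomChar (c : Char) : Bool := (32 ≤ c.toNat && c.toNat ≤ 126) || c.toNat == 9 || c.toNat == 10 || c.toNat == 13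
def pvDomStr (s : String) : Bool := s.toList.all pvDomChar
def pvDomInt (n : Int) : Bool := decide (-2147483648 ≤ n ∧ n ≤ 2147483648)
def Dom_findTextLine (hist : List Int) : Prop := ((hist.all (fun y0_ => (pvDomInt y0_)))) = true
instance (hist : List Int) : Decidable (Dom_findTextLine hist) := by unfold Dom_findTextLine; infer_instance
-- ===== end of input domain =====

-- B replaces A's single stateful scan (persisting start sentinel) by two edge-extraction
-- passes plus a sorted two-pointer merge; same cost, different decomposition.


-- ===== PORT A =====
-- indices i and i+1 drawn from range(len(hist)-1) are always in range, so pyGetD … 0 is exact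
def findTextLine (hist : List Int) : List (Int × Int) :=
  ((PySem.List.pyRange 0 ((hist.length : Int) - 1) 1).foldl
    (fun (st : List (Int × Int) × Int) i =>
      let start := if PySem.List.pyGetD hist i 0 = 0 ∧ 0 < PySem.List.pyGetD hist (i+1) 0
                   then i else st.2
      let lst := if 0 < PySem.List.pyGetD hist i 0 ∧ PySem.List.pyGetD hist (i+1) 0 = 0 ∧ start ≠ -1
                 then st.1 ++ [(start, i+1)] else st.1
      (lst, start))
    ([], -1)).1

-- ===== PORT B =====
-- the inner while: consume starts strictly below e, remembering the last one consumed
def pvAdvance (starts : List Int) (e : Int) (last : Option Int) : List Int × Option Int :=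
  match starts with
  | [] => ([], last)
  | s :: rest => if s < e then pvAdvance rest e (some s) else (s :: rest, last)

-- the for-loop over ends
def pvPairLoop (ends : List Int) (starts : List Int) (last : Option Int)
    (out : List (Int × Int)) : List (Int × Int) :=
  match ends with
  | [] => out
  | e :: rest =>
      let sl := pvAdvance starts e last
      match sl.2 with
      | some s => pvPairLoop rest sl.1 (some s) (out ++ [(s, e)])
      | none => pvPairLoop rest sl.1 none out

def findTextLine_alt (hist : List Int) : List (Int × Int) :=
  let n : Int := hist.length
  let starts := (PySem.List.pyRange 0 (n - 1) 1).filter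
    (fun i => decide (PySem.List.pyGetD hist i 0 = 0 ∧ 0 < PySem.List.pyGetD hist (i+1) 0))
  let ends := ((PySem.List.pyRange 0 (n - 1) 1).filter
    (fun i => decide (0 < PySem.List.pyGetD hist i 0 ∧ PySem.List.pyGetD hist (i+1) 0 = 0))).map (· + 1)
  pvPairLoop ends starts none []

-- ===== PRECONDITION & SPEC =====
def Spec_findTextLine (hist : List Int) (out : List (Int × Int)) : Prop := out = findTextLine_alt hist
instance (hist : List Int) (out : List (Int × Int)) : Decidable (Spec_findTextLine hist out) := by unfold Spec_findTextLine; infer_instance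

-- ===== CLAIM (what is proved, stated in full; the proofs are below) =====
def Claim_equal_findTextLine : Prop := ∀ (hist : List Int), Dom_findTextLine hist → Spec_findTextLine hist (findTextLine hist)

-- ===== LEMMAS AND PROOFS =====

-- reference recursion: process the index list once, carrying the last rising edge as an Option
def pvRef (hist : List Int) : List Int → Option Int → List (Int × Int)
  | [], _ => []
  | i :: is, last =>
    let last' := if PySem.List.pyGetD hist i 0 = 0 ∧ 0 < PySem.List.pyGetD hist (i+1) 0
                 then some i else last
    if 0 < PySem.List.pyGetD hist i 0 ∧ PySem.List.pyGetD hist (i+1) 0 = 0 then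
      match last' with
      | some s => (s, i+1) :: pvRef hist is last'
      | none => pvRef hist is last'
    else pvRef hist is last'

def pvOpt (start : Int) : Option Int := if start = -1 then none else some start

-- A's fold equals the reference recursion
theorem pvA_fold (hist : List Int) (is : List Int) (acc : List (Int × Int)) (start : Int)
    (hpos : ∀ i ∈ is, 0 ≤ i) :
    (is.foldl
      (fun (st : List (Int × Int) × Int) i =>
        let start := if PySem.List.pyGetD hist i 0 = 0 ∧ 0 < PySem.List.pyGetD hist (i+1) 0
                     then i else st.2
        let lst := if 0 < PySem.List.pyGetD hist i 0 ∧ PySem.List.pyGetD hist (i+1) 0 = 0 ∧ start ≠ -1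
                   then st.1 ++ [(start, i+1)] else st.1
        (lst, start))
      (acc, start)).1 = acc ++ pvRef hist is (pvOpt start) := by
  induction is generalizing acc start with
  | nil => simp [pvRef]
  | cons i is ih =>
    have hi : (0:Int) ≤ i := hpos i (List.mem_cons_self ..)
    have hrest : ∀ j ∈ is, (0:Int) ≤ j := fun j hj => hpos j (List.mem_cons_of_mem _ hj)
    simp only [List.foldl_cons]
    rw [ih _ _ hrest]
    by_cases hr : PySem.List.pyGetD hist i 0 = 0 ∧ 0 < PySem.List.pyGetD hist (i+1) 0
    · have hnf : ¬ (0 < PySem.List.pyGetD hist i 0 ∧ PySem.List.pyGetD hist (i+1) 0 = 0) := by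
        rintro ⟨h1, _⟩; omega
      have hne : i ≠ -1 := by omega
      simp [pvRef, hr, hnf, pvOpt, hne]
    · by_cases hf : 0 < PySem.List.pyGetD hist i 0 ∧ PySem.List.pyGetD hist (i+1) 0 = 0
      · by_cases hs : start = -1
        · simp [pvRef, hr, hf, hs, pvOpt]
        · simp [pvRef, hr, hf, hs, pvOpt]
      · have hnf3 : ¬ (0 < PySem.List.pyGetD hist i 0 ∧ PySem.List.pyGetD hist (i+1) 0 = 0 ∧ start ≠ -1) :=
          fun h => hf ⟨h.1, h.2.1⟩
        simp [pvRef, hnf3, hr, hf, pvOpt]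

-- pushing a start below every pending end into `last`
theorem pvPair_skip (ends starts : List Int) (i : Int) (last : Option Int)
    (out : List (Int × Int)) (h : ∀ e ∈ ends, i < e) :
    pvPairLoop ends (i :: starts) last out = pvPairLoop ends starts (some i) out := by
  cases ends with
  | nil => rfl
  | cons e rest =>
    have he : i < e := h e (List.mem_cons_self ..)
    simp [pvPairLoop, pvAdvance, he]

-- no start is below e: the while loop does nothing
theorem pvAdvance_stuck (starts : List Int) (e : Int) (last : Option Int)
    (h : ∀ s ∈ starts, ¬ s < e) : pvAdvance starts e last = (starts, last) := by
  cases starts with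
  | nil => rfl
  | cons s rest => simp [pvAdvance, h s (List.mem_cons_self ..)]

-- B's merge of the two filtered edge lists equals the reference recursion
theorem pvB_merge (hist : List Int) (is : List Int) (last : Option Int)
    (out : List (Int × Int)) (hsort : is.Pairwise (· < ·)) :
    pvPairLoop
      ((is.filter (fun i => decide (0 < PySem.List.pyGetD hist i 0 ∧ PySem.List.pyGetD hist (i+1) 0 = 0))).map (· + 1))
      (is.filter (fun i => decide (PySem.List.pyGetD hist i 0 = 0 ∧ 0 < PySem.List.pyGetD hist (i+1) 0)))
      last out = out ++ pvRef hist is last := by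
  induction is generalizing last out with
  | nil => simp [pvPairLoop, pvRef]
  | cons i is ih =>
    have hlt : ∀ j ∈ is, i < j := fun j hj => (List.pairwise_cons.1 hsort).1 j hj
    have hsort' := (List.pairwise_cons.1 hsort).2
    by_cases hr : PySem.List.pyGetD hist i 0 = 0 ∧ 0 < PySem.List.pyGetD hist (i+1) 0
    · have hnf : ¬ (0 < PySem.List.pyGetD hist i 0 ∧ PySem.List.pyGetD hist (i+1) 0 = 0) := by
        rintro ⟨h1, _⟩; omega
      rw [List.filter_cons_of_neg (by simpa using hnf), List.filter_cons_of_pos (by simpa using hr)]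
      rw [pvPair_skip _ _ _ _ _ (by
        intro e he
        simp only [List.mem_map, List.mem_filter] at he
        obtain ⟨j, hj, rfl⟩ := he
        have := hlt j hj.1; omega)]
      rw [ih _ _ hsort']
      simp [pvRef, hr, hnf]
    · by_cases hf : 0 < PySem.List.pyGetD hist i 0 ∧ PySem.List.pyGetD hist (i+1) 0 = 0
      · rw [List.filter_cons_of_pos (by simpa using hf), List.filter_cons_of_neg (by simpa using hr),
          List.map_cons]
        have hstuck := pvAdvance_stuck
          (is.filter (fun i => decide (PySem.List.pyGetD hist i 0 = 0 ∧ 0 < PySem.List.pyGetD hist (i+1) 0)))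
          (i + 1) last (by
            intro s hs
            have := hlt s (List.mem_filter.1 hs).1; omega)
        cases last with
        | none =>
          simp only [pvPairLoop, hstuck]
          rw [ih _ _ hsort']
          simp [pvRef, hr, hf]
        | some s =>
          simp only [pvPairLoop, hstuck]
          rw [ih _ _ hsort']
          simp [pvRef, hr, hf]
      · rw [List.filter_cons_of_neg (by simpa using hf), List.filter_cons_of_neg (by simpa using hr)]
        rw [ih _ _ hsort']
        simp [pvRef, hr, hf]

-- ===== VERDICT (by name: the statement is the Claim_ definition above) =====
theorem findTextLine_spec : Claim_equal_findTextLine := by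
  intro hist _
  unfold Spec_findTextLine findTextLine findTextLine_alt
  rw [pvA_fold hist _ [] (-1) (by
    intro i hi
    have := (PySem.List.mem_pyRange_one.1 hi).1; omega)]
  rw [pvB_merge hist _ none [] (PySem.List.pairwise_lt_pyRange_one ..)]
  simp [pvOpt]
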